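/-
  THE SCANNING LOOPS OF jsmn ON WELL-FORMED PIECES OF TEXT  (lemmas for Json/Jsmn/CorrectLoop.lean).

  The text is always described by what stands FROM a position on: `js.drop pos = piece ++ rest`.
    primScan_found / primScan_eoi   the loop of jsmn_parse_primitive over the characters of a number / literal stops at the first byte behind
    strScan_body                    the loop of jsmn_parse_string over a string body (RFC 8259 §7, escapes included) stops at the closing quote
    scanOpen_* / scanOpenContainer_eq_some   the backward scans over a token array in which the tokens after `a` are closed
  (the basic facts about u32 / i32 / getD / set come from Json/Jsmn/Lemmas.lean)
-/
import Json.Jsmn.Expected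
import Json.Jsmn.Lemmas

namespace Jsmn
open Json

/-! ### C arithmetic on values that do not wrap -/

-- (`u32_of_lt`, `u32_succ`, `u32_pred`, `i32_of_range`: Json/Jsmn/Lemmas.lean)
theorem i32_nat {n : Nat} (h : n < 2147483648) : i32 (n : Int) = n := i32_of_range (by omega) (by omega)

/-! ### Bytes -/

theorem beq_toNat (c k : UInt8) : (c == k) = (c.toNat == k.toNat) := by
  rw [Bool.eq_iff_iff]; simp [UInt8.toNat_inj]

/-- The characters of numbers and of `true`, `false`, `null`: digits, `+ - .`, `E`, lower-case letters. -/
def primChar (c : UInt8) : Bool :=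
  (0x61 ≤ c.toNat && c.toNat ≤ 0x7a) || isDigit c || c.toNat == 0x2b || c.toNat == 0x2d || c.toNat == 0x2e || c.toNat == 0x45

theorem primChar_ne_zero {c : UInt8} (h : primChar c = true) : (c != 0) = true := by
  simp [primChar, isDigit, bne, beq_toNat] at *; omega
theorem primChar_not_stop (cfg : Config) {c : UInt8} (h : primChar c = true) : primStop cfg c = false := by
  simp [primChar, isDigit, primStop, beq_toNat] at *; omega
theorem primChar_printable {c : UInt8} (h : primChar c = true) : (decide (c.toNat < 32) || decide (c.toNat ≥ 127)) = false := by
  simp [primChar, isDigit] at *; omega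
theorem primStop_ne_zero {cfg : Config} {c : UInt8} (h : primStop cfg c = true) : (c != 0) = true := by
  simp [primStop, bne, beq_toNat] at *; omega
theorem isWsChar_stop (cfg : Config) {c : UInt8} (h : isWsChar c = true) : primStop cfg c = true := by
  simp [isWsChar, primStop, beq_toNat] at *; omega

/-! ### Reading the text -/

theorem lt_of_drop {js : List UInt8} {pos : Nat} {c r} (h : js.drop pos = c :: r) : pos < js.length := by
  have := congrArg List.length h
  simp at this; omega
theorem charAt_of_drop {js : List UInt8} {pos : Nat} {c r} (h : js.drop pos = c :: r) : charAt js pos = c := by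
  have := List.getElem?_drop (xs := js) (i := pos) (j := 0)
  simp [h] at this
  simp [charAt, List.getD, ← this]
theorem more_of_drop {js : List UInt8} {pos : Nat} {c r} (h : js.drop pos = c :: r) (hc : (c != 0) = true) : more js pos = true := by
  simp [more, charAt_of_drop h, lt_of_drop h, hc]
theorem more_of_drop_nil {js : List UInt8} {pos : Nat} (h : js.drop pos = []) : more js pos = false := by
  have := congrArg List.length h
  simp at this
  simp [more]; omega
theorem drop_succ {js : List UInt8} {pos : Nat} {c r} (h : js.drop pos = c :: r) : js.drop (pos + 1) = r := by
  have : js.drop (pos + 1) = (js.drop pos).drop 1 := by simp [List.drop_drop]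
  rw [this, h]; rfl
theorem drop_advance {js : List UInt8} {pos : Nat} {a r} (h : js.drop pos = a ++ r) : js.drop (pos + a.length) = r := by
  have : js.drop (pos + a.length) = (js.drop pos).drop a.length := by simp [List.drop_drop]
  rw [this, h]; simp

/-! ### jsmn_parse_primitive's loop -/

/-- Over `t`, characters of a primitive, followed by a stop character: `goto found` there. -/
theorem primScan_found (cfg : Config) (js : List UInt8) (hjs : js.length < 4294967296) :
    ∀ (t : List UInt8) (fuel pos : Nat) (c : UInt8) (r : List UInt8), js.drop pos = t ++ c :: r → (∀ x ∈ t, primChar x = true) →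
      primStop cfg c = true → t.length < fuel → primScan cfg js fuel pos = some (.found (pos + t.length))
  | [], fuel, pos, c, r, hd, _, hc, hf => by
    obtain ⟨fuel, rfl⟩ : ∃ f, fuel = f + 1 := ⟨fuel - 1, by simp at hf; omega⟩
    simp at hd
    simp [primScan, more_of_drop hd (primStop_ne_zero hc), charAt_of_drop hd, hc]
  | x :: t, fuel, pos, c, r, hd, ht, hc, hf => by
    obtain ⟨fuel, rfl⟩ : ∃ f, fuel = f + 1 := ⟨fuel - 1, by simp at hf; omega⟩
    have hx : primChar x = true := ht x (by simp)
    have hd' : js.drop pos = x :: (t ++ c :: r) := by simpa using hd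
    have hlt := lt_of_drop hd'
    have ih := primScan_found cfg js hjs t fuel (pos + 1) c r (drop_succ hd') (fun y hy => ht y (by simp [hy])) hc (by simp at hf; omega)
    have hp := primChar_printable hx
    simp only [ge_iff_le] at hp
    simp only [primScan, more_of_drop hd' (primChar_ne_zero hx), charAt_of_drop hd', primChar_not_stop cfg hx, if_true, ge_iff_le, hp]
    simp only [Bool.false_eq_true, if_false]
    rw [u32_succ (by omega), ih]; simp; omega

/-- Over `t`, characters of a primitive, up to the end of the input: the loop test fails there. -/
theorem primScan_eoi (cfg : Config) (js : List UInt8) (hjs : js.length < 4294967296) :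
    ∀ (t : List UInt8) (fuel pos : Nat), js.drop pos = t → (∀ x ∈ t, primChar x = true) →
      t.length < fuel → primScan cfg js fuel pos = some (.eoi (pos + t.length))
  | [], fuel, pos, hd, _, hf => by
    obtain ⟨fuel, rfl⟩ : ∃ f, fuel = f + 1 := ⟨fuel - 1, by simp at hf; omega⟩
    simp [primScan, more_of_drop_nil hd]
  | x :: t, fuel, pos, hd, ht, hf => by
    obtain ⟨fuel, rfl⟩ : ∃ f, fuel = f + 1 := ⟨fuel - 1, by simp at hf; omega⟩
    have hx : primChar x = true := ht x (by simp)
    have hlt := lt_of_drop hd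
    have ih := primScan_eoi cfg js hjs t fuel (pos + 1) (drop_succ hd) (fun y hy => ht y (by simp [hy])) (by simp at hf; omega)
    have hp := primChar_printable hx
    simp only [ge_iff_le] at hp
    simp only [primScan, more_of_drop hd (primChar_ne_zero hx), charAt_of_drop hd, primChar_not_stop cfg hx, if_true, ge_iff_le, hp]
    simp only [Bool.false_eq_true, if_false]
    rw [u32_succ (by omega), ih]; simp; omega

/-! ### jsmn_parse_string's loop -/

theorem isHexDigit_isHex {c : UInt8} (h : isHexDigit c = true) : isHex c = true := by simpa [isHexDigit, isHex] using h
theorem isHexDigit_ne_zero {c : UInt8} (h : isHexDigit c = true) : (c != 0) = true := by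
  simp [isHexDigit, bne, beq_toNat] at *; omega
theorem isEscapeChar_simple {c : UInt8} (h : isEscapeChar c = true) : isSimpleEscape c = true := by
  simp [isEscapeChar, isSimpleEscape, beq_toNat] at *; omega

/-- The `\u` loop over four hex digits. -/
theorem hexScan_four (js : List UInt8) (hjs : js.length < 4294967296) {pos : Nat} {h1 h2 h3 h4 : UInt8} {r : List UInt8}
    (hd : js.drop pos = h1 :: h2 :: h3 :: h4 :: r) (e1 : isHexDigit h1 = true) (e2 : isHexDigit h2 = true) (e3 : isHexDigit h3 = true)
    (e4 : isHexDigit h4 = true) : hexScan js 4 pos = some (pos + 4) := by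
  have d1 := drop_succ hd
  have d2 := drop_succ d1
  have d3 := drop_succ d2
  have l3 := lt_of_drop d3
  simp only [hexScan, more_of_drop hd (isHexDigit_ne_zero e1), charAt_of_drop hd, isHexDigit_isHex e1, if_true]
  rw [u32_succ (by omega)]
  simp only [more_of_drop d1 (isHexDigit_ne_zero e2), charAt_of_drop d1, isHexDigit_isHex e2, if_true]
  rw [u32_succ (by omega)]
  simp only [more_of_drop d2 (isHexDigit_ne_zero e3), charAt_of_drop d2, isHexDigit_isHex e3, if_true]
  rw [u32_succ (by omega)]
  simp only [more_of_drop d3 (isHexDigit_ne_zero e4), charAt_of_drop d3, isHexDigit_isHex e4, if_true]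
  rw [u32_succ (by omega)]

/-- Over a string body followed by the closing quote: the loop stops AT the quote. -/
theorem strScan_body (js : List UInt8) (hjs : js.length < 4294967296) {b : List UInt8} (hb : IsStringBody b) :
    ∀ (fuel pos : Nat) (r : List UInt8), js.drop pos = b ++ 0x22 :: r → b.length < fuel →
      strScan js fuel pos = some (.quote (pos + b.length)) := by
  induction hb with
  | nil =>
    intro fuel pos r hd hf
    obtain ⟨fuel, rfl⟩ : ∃ f, fuel = f + 1 := ⟨fuel - 1, by simp at hf; omega⟩
    simp at hd
    simp [strScan, more_of_drop hd (by decide), charAt_of_drop hd]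
  | unescaped c rest hc _ ih =>
    intro fuel pos r hd hf
    obtain ⟨fuel, rfl⟩ : ∃ f, fuel = f + 1 := ⟨fuel - 1, by simp at hf; omega⟩
    have hd' : js.drop pos = c :: (rest ++ 0x22 :: r) := by simpa using hd
    have hlt := lt_of_drop hd'
    have h0 : (c != 0) = true := by simp [isUnescaped, bne, beq_toNat] at *; omega
    have h1 : (c == 0x22) = false := by simp [isUnescaped, beq_toNat] at *; omega
    have h2 : (c == 0x5c) = false := by simp [isUnescaped, beq_toNat] at *; omega
    simp only [strScan, more_of_drop hd' h0, charAt_of_drop hd', h1, h2, if_true, Bool.false_and, Bool.false_eq_true, if_false]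
    rw [u32_succ (by omega), ih fuel (pos + 1) r (drop_succ hd') (by simp at hf; omega)]; simp; omega
  | escape e rest he _ ih =>
    intro fuel pos r hd hf
    obtain ⟨fuel, rfl⟩ : ∃ f, fuel = f + 1 := ⟨fuel - 1, by simp at hf; omega⟩
    have hd' : js.drop pos = 0x5c :: e :: (rest ++ 0x22 :: r) := by simpa using hd
    have d1 := drop_succ hd'
    have l1 := lt_of_drop d1
    have hl : decide (pos + 1 < js.length) = true := by simpa using l1
    simp only [strScan, more_of_drop hd' (by decide), charAt_of_drop hd', if_true]
    rw [u32_succ (by omega)]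
    simp only [charAt_of_drop d1, isEscapeChar_simple he, hl, if_true]
    have : ((0x5c : UInt8) == 0x22) = false := by decide
    simp only [this, Bool.false_eq_true, if_false, beq_self_eq_true, Bool.and_self, if_true]
    rw [u32_succ (by omega), ih fuel (pos + 1 + 1) r (drop_succ d1) (by simp at hf; omega)]; simp; omega
  | unicode h1 h2 h3 h4 rest e1 e2 e3 e4 _ ih =>
    intro fuel pos r hd hf
    obtain ⟨fuel, rfl⟩ : ∃ f, fuel = f + 1 := ⟨fuel - 1, by simp at hf; omega⟩
    have hd' : js.drop pos = 0x5c :: 0x75 :: h1 :: h2 :: h3 :: h4 :: (rest ++ 0x22 :: r) := by simpa using hd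
    have d1 := drop_succ hd'
    have d2 := drop_succ d1
    have d5 := drop_succ (drop_succ (drop_succ d2))
    have l5 := lt_of_drop d5
    have d6 := drop_succ d5
    have hl : decide (pos + 1 < js.length) = true := by simp; omega
    simp only [strScan, more_of_drop hd' (by decide), charAt_of_drop hd', if_true]
    rw [u32_succ (by omega)]
    simp only [charAt_of_drop d1, hl]
    rw [u32_succ (by omega), hexScan_four js hjs d2 e1 e2 e3 e4]
    have a1 : ((0x5c : UInt8) == 0x22) = false := by decide
    have a2 : isSimpleEscape 0x75 = false := by decide
    simp only [a1, a2, Bool.false_eq_true, if_false, beq_self_eq_true, Bool.and_self, if_true]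
    have a3 : u32 (((pos + 1 + 1 + 4 : Nat) : Int) - 1) = pos + 1 + 1 + 4 - 1 := u32_pred (by omega) (by omega)
    rw [a3, show ((pos + 1 + 1 + 4 - 1 : Nat) : Int) + 1 = ((pos + 1 + 1 + 4 - 1 : Nat) : Int) + 1 from rfl, u32_succ (by omega)]
    rw [show pos + 1 + 1 + 4 - 1 + 1 = pos + 1 + 1 + 1 + 1 + 1 + 1 by omega, ih fuel _ r d6 (by simp at hf; omega)]
    simp; omega

/-! ### The token array: reads and writes at indices inside it -/

theorem getD_set_self (ts : Tokens) {i : Nat} (x : Token) (h : i < ts.length) : (ts.set i x).getD i default = x := by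
  simp [List.getD, h]
theorem getD_set_other (ts : Tokens) {i j : Nat} (x : Token) (h : i ≠ j) : (ts.set j x).getD i default = ts.getD i default := by
  simp [List.getD, Ne.symm h]
theorem tokUpd_nat (ts : Tokens) (i : Nat) (f : Token → Token) : tokUpd ts (i : Int) f = ts.set i (f (ts.getD i default)) := by
  simp [tokUpd, tokAt_nat]; omega

/-! ### The backward scans -/

/-- The scan from below `b` finds `a` when `a` is open and everything between is not. -/
theorem scanOpen_eq_some {ts : Tokens} {a : Nat} (ha : (ts.getD a default).isOpen = true) :
    ∀ b, a < b → (∀ i, a < i → i < b → (ts.getD i default).isOpen = false) → scanOpen ts b = some a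
  | 0, h, _ => by omega
  | b + 1, h, hcl => by
    by_cases hab : a = b
    · subst hab; simp only [scanOpen, ha, if_true]
    · simp only [scanOpen, hcl b (by omega) (by omega), Bool.false_eq_true, if_false]
      exact scanOpen_eq_some ha b (by omega) (fun i h1 h2 => hcl i h1 (by omega))

/-- The scan finds nothing when nothing is open. -/
theorem scanOpen_eq_none {ts : Tokens} : ∀ b, (∀ i, i < b → (ts.getD i default).isOpen = false) → scanOpen ts b = none
  | 0, _ => rfl
  | b + 1, hcl => by
    simp only [scanOpen, hcl b (by omega), Bool.false_eq_true, if_false]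
    exact scanOpen_eq_none b (fun i h => hcl i (by omega))

/-- The scan looks only at which tokens are open. -/
theorem scanOpen_congr {ts ts' : Tokens} :
    ∀ b, (∀ i, i < b → (ts'.getD i default).isOpen = (ts.getD i default).isOpen) → scanOpen ts' b = scanOpen ts b
  | 0, _ => rfl
  | b + 1, h => by
    simp only [scanOpen, h b (by omega)]
    rw [scanOpen_congr b (fun i hi => h i (by omega))]

/-- The `,` scan finds the open object or array `a` when everything after it is not open. -/
theorem scanOpenContainer_eq_some {ts : Tokens} {a : Nat} (ha : (ts.getD a default).isOpen = true)
    (hty : (ts.getD a default).type = JSMN_ARRAY ∨ (ts.getD a default).type = JSMN_OBJECT) :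
    ∀ b, a < b → (∀ i, a < i → i < b → (ts.getD i default).isOpen = false) → scanOpenContainer ts b = some a
  | 0, h, _ => by omega
  | b + 1, h, hcl => by
    by_cases hab : a = b
    · subst hab
      rcases hty with h | h <;> simp only [scanOpenContainer, ha, h] <;> rfl
    · simp only [scanOpenContainer, hcl b (by omega) (by omega), Bool.and_false, Bool.false_eq_true, if_false]
      exact scanOpenContainer_eq_some ha hty b (by omega) (fun i h1 h2 => hcl i h1 (by omega))

/-- The index jsmn's scans leave in `toksuper`: the last open token below `b`, or -1. -/
def openBelow (ts : Tokens) (b : Nat) : Int :=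
  match scanOpen ts b with
  | none => -1
  | some j => j

end Jsmn
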